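-- pv_equiv track=rewrite | github.com/HafsaAli2526/ZigBot_tx-explainer | src/context_keys.py | _tokenize_words
-- ===== SOURCE A (Python) =====
-- def _tokenize_words(text: str) -> list[str]:
--     words: list[str] = []
--     current: list[str] = []
--     for ch in text:
--         if ch.isalnum():
--             current.append(ch)
--             continue
--         if current:
--             words.append("".join(current))
--             current = []
--     if current:
--         words.append("".join(current))
--     return words
-- ===== SOURCE B (Python) =====
-- def _tokenize_words(text: str) -> list[str]:
--     words: list[str] = []
--     i = 0
--     n = len(text)
--     while i < n:
--         if not text[i].isalnum():
--             i += 1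
--             continue
--         j = i + 1
--         while j < n and text[j].isalnum():
--             j += 1
--         words.append(text[i:j])
--         i = j
--     return words
-- ===== Notes on version B (the rewrite author's own statement) =====
-- stated objective: alternative
-- what changed: Replaced the stateful per-character run accumulator with post-loop flush by a two-pointer index scan that finds each alphanumeric run's end and slices the word out of the string directly.
import Mathlib
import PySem

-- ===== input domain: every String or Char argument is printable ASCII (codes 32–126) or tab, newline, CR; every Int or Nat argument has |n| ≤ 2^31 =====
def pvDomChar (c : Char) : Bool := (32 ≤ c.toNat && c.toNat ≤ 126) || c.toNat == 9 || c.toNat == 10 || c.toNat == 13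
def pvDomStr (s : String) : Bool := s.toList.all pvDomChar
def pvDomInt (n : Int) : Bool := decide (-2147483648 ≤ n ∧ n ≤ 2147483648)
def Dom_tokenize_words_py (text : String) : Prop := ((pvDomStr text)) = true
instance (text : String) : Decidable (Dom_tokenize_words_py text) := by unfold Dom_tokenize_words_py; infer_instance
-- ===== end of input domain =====

-- B replaces A's per-character accumulator-and-flush loop by a two-pointer index scan that slices each alphanumeric run out directly (objective: alternative).

-- ===== PORT A =====
-- one fold step of A's for-loop over (words, current)
def pvStepA (st : List String × List Char) (ch : Char) : List String × List Char :=
  if PySem.Chars.isalnum ch then (st.1, st.2 ++ [ch])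
  else if st.2 = [] then st else (st.1 ++ [String.mk st.2], [])

def tokenize_words_py (text : String) : List String :=
  let s := text.toList.foldl pvStepA ([], [])
  if s.2 = [] then s.1 else s.1 ++ [String.mk s.2]

-- ===== PORT B =====
-- inner while: advance j while j < n and text[j].isalnum()
def pvAdv (cs : List Char) (j : Nat) : Nat :=
  if h : j < cs.length then
    if PySem.Chars.isalnum cs[j] then pvAdv cs (j + 1) else j
  else j
termination_by cs.length - j

theorem pvAdv_ge (cs : List Char) (j : Nat) : j ≤ pvAdv cs j := by
  fun_induction pvAdv cs j <;> omega

-- outer while over index i; text[i:j] with 0 ≤ i ≤ j ≤ n is exactly (drop i).take (j-i)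
def pvGo (cs : List Char) (i : Nat) : List String :=
  if h : i < cs.length then
    if PySem.Chars.isalnum cs[i] then
      let j := pvAdv cs (i + 1)
      String.mk ((cs.drop i).take (j - i)) :: pvGo cs j
    else pvGo cs (i + 1)
  else []
termination_by cs.length - i
decreasing_by
  · have := pvAdv_ge cs (i + 1); omega
  · omega

def tokenize_words_py_alt (text : String) : List String := pvGo text.toList 0

-- ===== PRECONDITION & SPEC =====
def Spec_tokenize_words_py (text : String) (out : List String) : Prop := out = tokenize_words_py_alt text
instance (text : String) (out : List String) : Decidable (Spec_tokenize_words_py text out) := by unfold Spec_tokenize_words_py; infer_instance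

-- ===== CLAIM (what is proved, stated in full; the proofs are below) =====
def Claim_equal_tokenize_words_py : Prop := ∀ (text : String), Dom_tokenize_words_py text → Spec_tokenize_words_py text (tokenize_words_py text)

-- ===== LEMMAS AND PROOFS =====

-- reference recursion: tokenization continued with pending run `cur`
def pvTok (cur : List Char) : List Char → List String
  | [] => if cur = [] then [] else [String.mk cur]
  | c :: cs =>
    if PySem.Chars.isalnum c then pvTok (cur ++ [c]) cs
    else if cur = [] then pvTok [] cs else String.mk cur :: pvTok [] cs

theorem pvTok_foldA (cs : List Char) : ∀ (ws : List String) (cur : List Char),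
    (let s := cs.foldl pvStepA (ws, cur); if s.2 = [] then s.1 else s.1 ++ [String.mk s.2])
      = ws ++ pvTok cur cs := by
  induction cs with
  | nil => intro ws cur; by_cases h : cur = [] <;> simp [pvTok, h]
  | cons c cs ih =>
    intro ws cur
    by_cases ha : PySem.Chars.isalnum c
    · simpa [pvStepA, ha, pvTok] using ih ws (cur ++ [c])
    · by_cases hc : cur = []
      · simpa [pvStepA, ha, hc, pvTok] using ih ws []
      · simpa [pvStepA, ha, hc, pvTok] using ih (ws ++ [String.mk cur]) []

theorem pvTok_run (cs : List Char) : ∀ (k : Nat) (cur : List Char),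
    (cur ≠ [] ∨ (∃ h : k < cs.length, PySem.Chars.isalnum cs[k])) →
    pvTok cur (cs.drop k)
      = String.mk (cur ++ (cs.drop k).take (pvAdv cs k - k)) :: pvTok [] (cs.drop (pvAdv cs k)) := by
  intro k
  fun_induction pvAdv cs k with
  | case1 k h ha ih =>
    intro cur _
    have hd : cs.drop k = cs[k] :: cs.drop (k + 1) := List.drop_eq_getElem_cons h
    have hge := pvAdv_ge cs (k + 1)
    rw [hd, pvTok, if_pos ha, ih (cur ++ [cs[k]]) (Or.inl (by simp))]
    rw [show pvAdv cs (k + 1) - k = (pvAdv cs (k + 1) - (k + 1)) + 1 from by omega,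
      List.take_succ_cons]
    simp only [List.append_assoc, List.singleton_append]
  | case2 k h ha =>
    intro cur hcur
    have hc : cur ≠ [] := by
      rcases hcur with h' | ⟨_, h'⟩
      · exact h'
      · exact absurd h' ha
    have hd : cs.drop k = cs[k] :: cs.drop (k + 1) := List.drop_eq_getElem_cons h
    rw [hd]
    simp only [Nat.sub_self, List.take_zero, List.append_nil]
    rw [pvTok, if_neg ha, if_neg hc]
    conv_rhs => rw [pvTok]
    simp [ha]
  | case3 k h =>
    intro cur hcur
    have hc : cur ≠ [] := by
      rcases hcur with h' | ⟨h', _⟩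
      · exact h'
      · exact absurd h' h
    have hd : cs.drop k = [] := List.drop_eq_nil_of_le (by omega)
    simp [hd, pvTok, hc]

theorem pvGo_eq_tok (cs : List Char) (i : Nat) : pvGo cs i = pvTok [] (cs.drop i) := by
  fun_induction pvGo cs i with
  | case1 i h ha jv ih =>
    have hadv : pvAdv cs i = pvAdv cs (i + 1) := by
      rw [pvAdv]; simp [h, ha]
    have hrun := pvTok_run cs i [] (Or.inr ⟨h, ha⟩)
    rw [hrun, hadv]
    simp only [List.nil_append]
    exact congrArg _ ih
  | case2 i h ha ih =>
    have hd : cs.drop i = cs[i] :: cs.drop (i + 1) := List.drop_eq_getElem_cons h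
    rw [hd, pvTok, if_neg ha, if_pos rfl]
    exact ih
  | case3 i h =>
    have hd : cs.drop i = [] := List.drop_eq_nil_of_le (by omega)
    simp [hd, pvTok]

-- ===== VERDICT (by name: the statement is the Claim_ definition above) =====
theorem tokenize_words_py_spec : Claim_equal_tokenize_words_py := by
  intro text _
  unfold Spec_tokenize_words_py tokenize_words_py tokenize_words_py_alt
  rw [pvGo_eq_tok]
  simpa using pvTok_foldA text.toList [] []
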